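-- pv_equiv track=rewrite | github.com/netskopeoss/netskope-cli | src/netskope_cli/core/output.py | _select_priority_columns
-- ===== SOURCE A (Python) =====
-- _PRIORITY_EXACT_NAMES = (
--     "name",
--     "id",
--     "_id",
--     "status",
--     "user",
--     "userName",
--     "app",
--     "alert_name",
--     "alert_type",
--     "severity",
--     "timestamp",
--     "action",
--     "type",
--     "display_name",
--     "displayName",
--     "email",
--     "active",
--     "tenant",
--     "description",
--     "count",
--     "publisher_name",
--     "publisher_id",
--     "site",
--     "version",
-- )
--
-- _PRIORITY_SUBSTRINGS = (
--     "name",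
--     "id",
--     "user",
--     "timestamp",
--     "status",
--     "type",
--     "app",
--     "action",
--     "severity",
--     "email",
--     "description",
-- )
--
-- _WIDE_TABLE_MAX_COLUMNS = 10
--
-- def _select_priority_columns(all_keys: list[str]) -> list[str]:
--     """Pick up to ``_WIDE_TABLE_MAX_COLUMNS`` columns, preferring 'important' ones."""
--     exact_match: list[str] = []
--     substring_match: list[str] = []
--     rest: list[str] = []
--
--     exact_lower = {n.lower() for n in _PRIORITY_EXACT_NAMES}
--
--     for key in all_keys:
--         key_lower = key.lower()
--         if key_lower in exact_lower or key in _PRIORITY_EXACT_NAMES: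
--             exact_match.append(key)
--         elif any(sub in key_lower for sub in _PRIORITY_SUBSTRINGS):
--             substring_match.append(key)
--         else:
--             rest.append(key)
--
--     selected = exact_match[:_WIDE_TABLE_MAX_COLUMNS]
--     remaining = _WIDE_TABLE_MAX_COLUMNS - len(selected)
--     if remaining > 0:
--         selected.extend(substring_match[:remaining])
--         remaining = _WIDE_TABLE_MAX_COLUMNS - len(selected)
--     if remaining > 0:
--         selected.extend(rest[:remaining])
--
--     # Preserve original column order.
--     selected_set = set(selected)
--     return [k for k in all_keys if k in selected_set]
-- ===== SOURCE B (Python) =====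
-- _PRIORITY_EXACT_NAMES = (
--     "name", "id", "_id", "status", "user", "userName", "app", "alert_name",
--     "alert_type", "severity", "timestamp", "action", "type", "display_name",
--     "displayName", "email", "active", "tenant", "description", "count",
--     "publisher_name", "publisher_id", "site", "version",
-- )
--
-- _PRIORITY_SUBSTRINGS = (
--     "name", "id", "user", "timestamp", "status", "type", "app", "action",
--     "severity", "email", "description",
-- )
--
-- _WIDE_TABLE_MAX_COLUMNS = 10
--
-- _EXACT_LOWER = {n.lower() for n in _PRIORITY_EXACT_NAMES}
--
--
-- def _rank(key: str) -> int:
--     """0 = exact priority name, 1 = contains a priority substring, 2 = anything else."""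
--     key_lower = key.lower()
--     if key_lower in _EXACT_LOWER or key in _PRIORITY_EXACT_NAMES:
--         return 0
--     if any(sub in key_lower for sub in _PRIORITY_SUBSTRINGS):
--         return 1
--     return 2
--
--
-- def _select_priority_columns(all_keys: list[str]) -> list[str]:
--     """Pick up to ``_WIDE_TABLE_MAX_COLUMNS`` columns, preferring 'important' ones."""
--     chosen = set(sorted(all_keys, key=_rank)[:_WIDE_TABLE_MAX_COLUMNS])
--     return [k for k in all_keys if k in chosen]
-- ===== Notes on version B (the rewrite author's own statement) =====
-- stated objective: simpler
-- what changed: Replaces the three-bucket accumulation with staged take/extend arithmetic by one stable sort on a rank function (0 exact, 1 substring, 2 rest) and a single [:10] slice; stability makes the first 10 of the sorted list exactly the bucket selection.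
import Mathlib
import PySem

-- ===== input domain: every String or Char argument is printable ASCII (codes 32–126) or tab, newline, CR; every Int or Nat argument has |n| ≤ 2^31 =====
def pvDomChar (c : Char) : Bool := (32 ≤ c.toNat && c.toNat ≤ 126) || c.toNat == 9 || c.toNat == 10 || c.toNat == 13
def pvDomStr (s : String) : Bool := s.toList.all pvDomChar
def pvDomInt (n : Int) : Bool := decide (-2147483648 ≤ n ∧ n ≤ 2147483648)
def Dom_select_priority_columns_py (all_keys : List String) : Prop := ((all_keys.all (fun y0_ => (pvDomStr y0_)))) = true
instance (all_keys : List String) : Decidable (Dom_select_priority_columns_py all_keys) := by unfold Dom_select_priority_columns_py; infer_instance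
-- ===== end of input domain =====

-- B replaces A's three accumulated buckets and staged take/extend arithmetic by one stable
-- sort on a rank function and a single take-10 (objective: simpler).

-- shared module-level constants (_PRIORITY_EXACT_NAMES, _PRIORITY_SUBSTRINGS)
def pvExactNames : List String :=
  ["name", "id", "_id", "status", "user", "userName", "app", "alert_name",
   "alert_type", "severity", "timestamp", "action", "type", "display_name",
   "displayName", "email", "active", "tenant", "description", "count",
   "publisher_name", "publisher_id", "site", "version"]

def pvSubstrings : List String :=
  ["name", "id", "user", "timestamp", "status", "type", "app", "action",
   "severity", "email", "description"]

-- ===== PORT A =====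
def select_priority_columns_py (all_keys : List String) : List String :=
  let exact_lower : PySem.Set String := PySem.Set.ofList (pvExactNames.map PySem.Str.lower)
  let st := all_keys.foldl
    (fun (acc : List String × List String × List String) key =>
      let key_lower := PySem.Str.lower key
      if PySem.Set.contains exact_lower key_lower || pvExactNames.contains key then
        (acc.1 ++ [key], acc.2.1, acc.2.2)
      else if pvSubstrings.any (fun sub => PySem.Str.isIn sub key_lower) then
        (acc.1, acc.2.1 ++ [key], acc.2.2)
      else
        (acc.1, acc.2.1, acc.2.2 ++ [key]))
    ([], [], [])
  let selected := st.1.take 10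
  let remaining : Int := 10 - selected.length
  let selected := if remaining > 0 then selected ++ st.2.1.take remaining.toNat else selected
  let remaining : Int := 10 - selected.length
  let selected := if remaining > 0 then selected ++ st.2.2.take remaining.toNat else selected
  let selected_set := PySem.Set.ofList selected
  all_keys.filter (fun k => PySem.Set.contains selected_set k)

-- ===== PORT B =====
def pvExactLower : PySem.Set String := PySem.Set.ofList (pvExactNames.map PySem.Str.lower)

def pvRank (key : String) : Int :=
  let key_lower := PySem.Str.lower key
  if PySem.Set.contains pvExactLower key_lower || pvExactNames.contains key then 0
  else if pvSubstrings.any (fun sub => PySem.Str.isIn sub key_lower) then 1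
  else 2

def select_priority_columns_py_alt (all_keys : List String) : List String :=
  let chosen : PySem.Set String := PySem.Set.ofList ((PySem.List.sorted all_keys pvRank).take 10)
  all_keys.filter (fun k => PySem.Set.contains chosen k)

-- ===== PRECONDITION & SPEC =====
def Spec_select_priority_columns_py (all_keys : List String) (out : List String) : Prop := out = select_priority_columns_py_alt all_keys
instance (all_keys : List String) (out : List String) : Decidable (Spec_select_priority_columns_py all_keys out) := by unfold Spec_select_priority_columns_py; infer_instance

-- ===== CLAIM (what is proved, stated in full; the proofs are below) =====
def Claim_equal_select_priority_columns_py : Prop := ∀ (all_keys : List String), Dom_select_priority_columns_py all_keys → Spec_select_priority_columns_py all_keys (select_priority_columns_py all_keys)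

-- ===== LEMMAS AND PROOFS =====

-- the two branch tests of A's loop (proof-side abbreviations)
def pvC0 (k : String) : Bool :=
  PySem.Set.contains pvExactLower (PySem.Str.lower k) || pvExactNames.contains k
def pvC1 (k : String) : Bool :=
  pvSubstrings.any (fun sub => PySem.Str.isIn sub (PySem.Str.lower k))

theorem pvRank_eq (k : String) : pvRank k = if pvC0 k then 0 else if pvC1 k then 1 else 2 := rfl

-- the rank takes only the values 0, 1, 2
theorem pvRank_cases (k : String) : pvRank k = 0 ∨ pvRank k = 1 ∨ pvRank k = 2 := by
  rw [pvRank_eq]; split_ifs <;> simp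

theorem pvRank_zero_iff (k : String) : (pvRank k = 0) ↔ pvC0 k = true := by
  rw [pvRank_eq]; split_ifs with h1 h2 <;> simp [*]

theorem pvRank_one_iff (k : String) : (pvRank k = 1) ↔ (pvC0 k = false ∧ pvC1 k = true) := by
  rw [pvRank_eq]; split_ifs with h1 h2 <;> simp [*]

theorem pvRank_two_iff (k : String) : (pvRank k = 2) ↔ (pvC0 k = false ∧ pvC1 k = false) := by
  rw [pvRank_eq]; split_ifs with h1 h2 <;> simp [*]

-- A's loop fills the three buckets with the rank-0, rank-1, rank-2 keys in order
theorem pvFold_buckets (xs : List String) (a b c : List String) :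
    xs.foldl
      (fun (acc : List String × List String × List String) key =>
        let key_lower := PySem.Str.lower key
        if PySem.Set.contains (PySem.Set.ofList (pvExactNames.map PySem.Str.lower)) key_lower || pvExactNames.contains key then
          (acc.1 ++ [key], acc.2.1, acc.2.2)
        else if pvSubstrings.any (fun sub => PySem.Str.isIn sub key_lower) then
          (acc.1, acc.2.1 ++ [key], acc.2.2)
        else
          (acc.1, acc.2.1, acc.2.2 ++ [key])) (a, b, c)
    = (a ++ xs.filter (fun k => pvRank k == 0),
       b ++ xs.filter (fun k => pvRank k == 1),
       c ++ xs.filter (fun k => pvRank k == 2)) := by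
  induction xs generalizing a b c with
  | nil => simp
  | cons x xs ih =>
    simp only [List.foldl_cons, List.filter_cons]
    rcases pvRank_cases x with h | h | h
    · have h0 : pvC0 x = true := (pvRank_zero_iff x).mp h
      have h0' : (PySem.Set.contains (PySem.Set.ofList (pvExactNames.map PySem.Str.lower)) (PySem.Str.lower x) || pvExactNames.contains x) = true := h0
      simp only [h0', if_true, ih, h]
      simp
    · obtain ⟨h0, h1⟩ := (pvRank_one_iff x).mp h
      have h0' : (PySem.Set.contains (PySem.Set.ofList (pvExactNames.map PySem.Str.lower)) (PySem.Str.lower x) || pvExactNames.contains x) = false := h0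
      have h1' : (pvSubstrings.any fun sub => PySem.Str.isIn sub (PySem.Str.lower x)) = true := h1
      simp only [h0', h1', Bool.false_eq_true, if_false, if_true, ih, h]
      simp
    · obtain ⟨h0, h1⟩ := (pvRank_two_iff x).mp h
      have h0' : (PySem.Set.contains (PySem.Set.ofList (pvExactNames.map PySem.Str.lower)) (PySem.Str.lower x) || pvExactNames.contains x) = false := h0
      have h1' : (pvSubstrings.any fun sub => PySem.Str.isIn sub (PySem.Str.lower x)) = false := h1
      simp only [h0', h1', Bool.false_eq_true, if_false, ih, h]
      simp

-- inserting before the first strictly-greater element skips a no-insert prefix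
theorem pvInsert_skip {x : String} (e rest : List String)
    (he : ∀ y ∈ e, pvRank y ≤ pvRank x) :
    PySem.List.insertBy (fun a b => decide (pvRank a < pvRank b)) x (e ++ rest)
      = e ++ PySem.List.insertBy (fun a b => decide (pvRank a < pvRank b)) x rest := by
  induction e with
  | nil => simp
  | cons y e ih =>
    have hy : ¬ (pvRank x < pvRank y) := not_lt.mpr (he y (List.mem_cons_self))
    simp only [List.cons_append, PySem.List.insertBy, hy, decide_false, Bool.false_eq_true,
      if_false]
    exact congrArg (y :: ·) (ih (fun z hz => he z (List.mem_cons_of_mem _ hz)))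

theorem pvInsert_front (x : String) (rest : List String)
    (h : ∀ y ∈ rest, pvRank x < pvRank y) :
    PySem.List.insertBy (fun a b => decide (pvRank a < pvRank b)) x rest = x :: rest := by
  cases rest with
  | nil => rfl
  | cons y ys =>
    have := h y (List.mem_cons_self)
    simp [PySem.List.insertBy, this]

-- the insertion-sort fold preserves the three-bucket shape
theorem pvFold_insert (xs : List String) (a b c : List String)
    (ha : ∀ y ∈ a, pvRank y = 0) (hb : ∀ y ∈ b, pvRank y = 1) (hc : ∀ y ∈ c, pvRank y = 2) :
    xs.foldl (fun acc x => PySem.List.insertBy (fun a b => decide (pvRank a < pvRank b)) x acc)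
        (a ++ b ++ c)
    = (a ++ xs.filter (fun k => pvRank k == 0)) ++ (b ++ xs.filter (fun k => pvRank k == 1))
        ++ (c ++ xs.filter (fun k => pvRank k == 2)) := by
  induction xs generalizing a b c with
  | nil => simp
  | cons x xs ih =>
    simp only [List.foldl_cons, List.filter_cons]
    rcases pvRank_cases x with h | h | h
    · have step : PySem.List.insertBy (fun a b => decide (pvRank a < pvRank b)) x (a ++ b ++ c)
          = (a ++ [x]) ++ b ++ c := by
        rw [List.append_assoc, pvInsert_skip a (b ++ c) (fun y hy => by rw [ha y hy, h]),
          pvInsert_front x (b ++ c) (fun y hy => by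
            rcases List.mem_append.mp hy with hy | hy
            · rw [hb y hy, h]; norm_num
            · rw [hc y hy, h]; norm_num)]
        simp
      rw [step, ih (a ++ [x]) b c
        (fun y hy => by rcases List.mem_append.mp hy with hy | hy
                        · exact ha y hy
                        · simpa using (by simpa using hy) ▸ h) hb hc]
      simp [h]
    · obtain ⟨h0, _⟩ := (pvRank_one_iff x).mp h
      have step : PySem.List.insertBy (fun a b => decide (pvRank a < pvRank b)) x (a ++ b ++ c)
          = a ++ (b ++ [x]) ++ c := by
        rw [pvInsert_skip (a ++ b) c (fun y hy => by
            rcases List.mem_append.mp hy with hy | hy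
            · rw [ha y hy, h]; norm_num
            · rw [hb y hy, h]),
          pvInsert_front x c (fun y hy => by rw [hc y hy, h]; norm_num)]
        simp
      rw [step, ih a (b ++ [x]) c ha
        (fun y hy => by rcases List.mem_append.mp hy with hy | hy
                        · exact hb y hy
                        · simpa using (by simpa using hy) ▸ h) hc]
      have hne0 : ¬ (pvRank x = 0) := by rw [h]; norm_num
      simp [h]
    · have step : PySem.List.insertBy (fun a b => decide (pvRank a < pvRank b)) x (a ++ b ++ c)
          = a ++ b ++ (c ++ [x]) := by
        rw [PySem.List.insertBy_of_forall_not_before _ _ _ (fun y hy => by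
          rcases List.mem_append.mp hy with hy | hy
          · rcases List.mem_append.mp hy with hy | hy
            · rw [decide_eq_false_iff_not, not_lt, ha y hy, h]; norm_num
            · rw [decide_eq_false_iff_not, not_lt, hb y hy, h]; norm_num
          · rw [decide_eq_false_iff_not, not_lt, hc y hy, h])]
        simp
      rw [step, ih a b (c ++ [x]) ha hb
        (fun y hy => by rcases List.mem_append.mp hy with hy | hy
                        · exact hc y hy
                        · simpa using (by simpa using hy) ▸ h)]
      have hne0 : ¬ (pvRank x = 0) := by rw [h]; norm_num
      have hne1 : ¬ (pvRank x = 1) := by rw [h]; norm_num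
      simp [h]

-- stable sort by a {0,1,2}-valued rank is the concatenation of the three rank buckets
theorem pvSorted_buckets (xs : List String) :
    PySem.List.sorted xs pvRank
      = xs.filter (fun k => pvRank k == 0) ++ xs.filter (fun k => pvRank k == 1)
          ++ xs.filter (fun k => pvRank k == 2) := by
  rw [PySem.List.sorted_eq_foldl_insertBy]
  simpa using pvFold_insert xs [] [] [] (by simp) (by simp) (by simp)

-- A's staged selection is the first ten of the concatenated buckets
theorem pvTake_staged (E S R : List String) :
    (if 10 - ((if 10 - (((E.take 10).length : Int)) > 0 then
                   E.take 10 ++ S.take ((10 - (((E.take 10).length : Int))).toNat)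
                 else E.take 10).length : Int) > 0 then
       (if 10 - (((E.take 10).length : Int)) > 0 then
            E.take 10 ++ S.take ((10 - (((E.take 10).length : Int))).toNat)
          else E.take 10)
         ++ R.take ((10 - ((if 10 - (((E.take 10).length : Int)) > 0 then
                                E.take 10 ++ S.take ((10 - (((E.take 10).length : Int))).toNat)
                              else E.take 10).length : Int)).toNat)
     else
       (if 10 - (((E.take 10).length : Int)) > 0 then
            E.take 10 ++ S.take ((10 - (((E.take 10).length : Int))).toNat)
          else E.take 10))
    = (E ++ S ++ R).take 10 := by
  rw [List.take_append, List.take_append]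
  by_cases hE : E.length < 10
  · have htE : E.take 10 = E := List.take_of_length_le (by omega)
    rw [htE, if_pos (show (10 : Int) - (E.length : Int) > 0 by omega)]
    have htn : ((10 : Int) - (E.length : Int)).toNat = 10 - E.length := by omega
    rw [htn]
    by_cases hS : 10 - E.length ≤ S.length
    · have hlen : (E ++ S.take (10 - E.length)).length = 10 := by
        rw [List.length_append, List.length_take]; omega
      rw [if_neg (by rw [hlen]; omega)]
      have hz : 10 - (E ++ S).length = 0 := by rw [List.length_append]; omega
      rw [hz, List.take_zero, List.append_nil]
    · have htS : S.take (10 - E.length) = S := List.take_of_length_le (by omega)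
      rw [htS]
      have hlen : (E ++ S).length = E.length + S.length := List.length_append
      rw [if_pos (show (10 : Int) - ((E ++ S).length : Int) > 0 by rw [hlen]; omega)]
      have htn2 : ((10 : Int) - ((E ++ S).length : Int)).toNat = 10 - (E ++ S).length := by
        rw [hlen]; omega
      rw [htn2, List.append_assoc]
  · have hlen : (E.take 10).length = 10 := by rw [List.length_take]; omega
    have hc : ¬ ((10 : Int) - (((E.take 10).length : Nat) : Int) > 0) := by rw [hlen]; omega
    rw [if_neg hc, if_neg hc]
    have hz : 10 - E.length = 0 := by omega
    have hz2 : 10 - (E ++ S).length = 0 := by rw [List.length_append]; omega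
    rw [hz, hz2, List.take_zero, List.take_zero, List.append_nil, List.append_nil]

-- ===== VERDICT (by name: the statement is the Claim_ definition above) =====
theorem select_priority_columns_py_spec : Claim_equal_select_priority_columns_py := by
  intro all_keys _
  unfold Spec_select_priority_columns_py select_priority_columns_py select_priority_columns_py_alt
  simp only [pvFold_buckets all_keys [] [] [], List.nil_append]
  rw [pvSorted_buckets, pvTake_staged]
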